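-- pv_equiv track=rewrite | github.com/zhouyida0724/diffusion-planner-project | nuplan-visualization/nuplan/diffusion_planner/data_process/map_process.py | _prune_route_by_connectivity
-- ===== SOURCE A (Python) =====
-- from typing import List, Dict, Tuple, Set
--
-- def _prune_route_by_connectivity(route_roadblock_ids: List[str], roadblock_ids: Set[str]) -> List[str]:
--     """
--     Prune route by overlap with extracted roadblock elements within query radius to maintain connectivity in route
--     feature. Assumes route_roadblock_ids is ordered and connected to begin with.
--     :param route_roadblock_ids: List of roadblock ids representing route.
--     :param roadblock_ids: Set of ids of extracted roadblocks within query radius.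
--     :return: List of pruned roadblock ids (connected and within query radius).
--     """
--     pruned_route_roadblock_ids: List[str] = []
--     route_start = False  # wait for route to come into query radius before declaring broken connection
--
--     for roadblock_id in route_roadblock_ids:
--
--         if roadblock_id in roadblock_ids:
--             pruned_route_roadblock_ids.append(roadblock_id)
--             route_start = True
--
--         elif route_start:  # connection broken
--             break
--
--     return pruned_route_roadblock_ids
-- ===== SOURCE B (Python) =====
-- from typing import List, Set
--
-- def _prune_route_by_connectivity(route_roadblock_ids: List[str], roadblock_ids: Set[str]) -> List[str]:
--     """Compute a membership mask, locate the first in-radius index and the next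
--     out-of-radius index after it, and return that slice of the route."""
--     flags = [r in roadblock_ids for r in route_roadblock_ids]
--     try:
--         start = flags.index(True)
--     except ValueError:
--         return []
--     try:
--         stop = flags.index(False, start)
--     except ValueError:
--         stop = len(flags)
--     return route_roadblock_ids[start:stop]
-- ===== Notes on version B (the rewrite author's own statement) =====
-- stated objective: alternative
-- what changed: Replaces A's flag-state loop with break by an index/slice computation: build a boolean membership mask, find the first True index and the first False index after it with list.index, and return the corresponding slice of the route.
import Mathlib
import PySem

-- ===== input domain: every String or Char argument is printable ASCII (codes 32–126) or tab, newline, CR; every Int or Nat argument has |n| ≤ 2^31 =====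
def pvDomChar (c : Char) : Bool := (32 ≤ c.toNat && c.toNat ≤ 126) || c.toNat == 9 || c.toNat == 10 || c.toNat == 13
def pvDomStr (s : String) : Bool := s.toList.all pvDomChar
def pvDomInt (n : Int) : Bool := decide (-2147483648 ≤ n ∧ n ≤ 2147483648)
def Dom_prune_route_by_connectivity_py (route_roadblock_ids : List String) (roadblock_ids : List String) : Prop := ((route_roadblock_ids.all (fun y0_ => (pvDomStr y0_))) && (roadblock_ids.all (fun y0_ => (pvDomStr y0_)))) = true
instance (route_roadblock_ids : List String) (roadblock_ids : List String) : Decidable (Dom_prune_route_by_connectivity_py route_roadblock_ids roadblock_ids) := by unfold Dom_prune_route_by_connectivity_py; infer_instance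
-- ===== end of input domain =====

-- B replaces A's flag-state loop by a mask/index/slice computation (alternative decomposition, same cost).

-- ===== PORT A =====
-- A's loop: append while in the set, set route_start; break once started and a miss occurs.
def pruneLoopA (roadblock_ids : List String) : List String → Bool → List String
  | [], _ => []
  | x :: xs, route_start =>
    if roadblock_ids.contains x then
      x :: pruneLoopA roadblock_ids xs true
    else if route_start then
      []  -- break: connection broken
    else
      pruneLoopA roadblock_ids xs route_start

def prune_route_by_connectivity_py (route_roadblock_ids : List String) (roadblock_ids : List String) : List String :=
  pruneLoopA roadblock_ids route_roadblock_ids false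

-- ===== PORT B =====
-- Source B: boolean membership mask; start = flags.index(True) (ValueError → return []);
-- stop = flags.index(False, start) (ValueError → len(flags)); return route[start:stop].
-- Python's flags.index(v, start) is ported exactly as start + index? of v in flags.drop start.
def prune_route_by_connectivity_py_alt (route_roadblock_ids : List String) (roadblock_ids : List String) : List String :=
  let flags := route_roadblock_ids.map (fun r => roadblock_ids.contains r)
  match PySem.List.index? flags true with
  | none => []
  | some start =>
    let stop : Nat :=
      match PySem.List.index? (flags.drop start) false with
      | some k => start + k
      | none => flags.length
    PySem.List.slice route_roadblock_ids (some (start : Int)) (some (stop : Int))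

-- ===== PRECONDITION & SPEC =====
def Spec_prune_route_by_connectivity_py (route_roadblock_ids : List String) (roadblock_ids : List String) (out : List String) : Prop := out = prune_route_by_connectivity_py_alt route_roadblock_ids roadblock_ids
instance (route_roadblock_ids : List String) (roadblock_ids : List String) (out : List String) : Decidable (Spec_prune_route_by_connectivity_py route_roadblock_ids roadblock_ids out) := by unfold Spec_prune_route_by_connectivity_py; infer_instance

-- ===== CLAIM (what is proved, stated in full; the proofs are below) =====
def Claim_equal_prune_route_by_connectivity_py : Prop := ∀ (route_roadblock_ids : List String) (roadblock_ids : List String), Dom_prune_route_by_connectivity_py route_roadblock_ids roadblock_ids → Spec_prune_route_by_connectivity_py route_roadblock_ids roadblock_ids (prune_route_by_connectivity_py route_roadblock_ids roadblock_ids)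

-- ===== LEMMAS AND PROOFS =====
-- Once started, A's loop is takeWhile (∈ ids).
theorem pruneLoopA_true (ids xs : List String) :
    pruneLoopA ids xs true = xs.takeWhile (fun r => ids.contains r) := by
  induction xs with
  | nil => rfl
  | cons x xs ih =>
    by_cases h : x ∈ ids <;> simp [pruneLoopA, List.takeWhile, h, ih]

-- Before starting, A's loop skips misses: dropWhile then takeWhile.
theorem pruneLoopA_false (ids xs : List String) :
    pruneLoopA ids xs false =
      (xs.dropWhile (fun r => !(ids.contains r))).takeWhile (fun r => ids.contains r) := by
  induction xs with
  | nil => rfl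
  | cons x xs ih =>
    by_cases h : x ∈ ids
    · simp [pruneLoopA, List.dropWhile, h, pruneLoopA_true]
    · simp [pruneLoopA, List.dropWhile, h, ih]

-- The first True of the mask marks where dropWhile (miss) lands.
theorem index_true_dropWhile (p : String → Bool) (xs : List String) :
    (match PySem.List.index? (xs.map p) true with
      | none => ([] : List String)
      | some s => xs.drop s) = xs.dropWhile (fun r => !(p r)) := by
  induction xs with
  | nil => rfl
  | cons x xs ih =>
    rw [PySem.List.index?_eq_idxOf?] at ih ⊢
    rw [List.map_cons, List.idxOf?_cons]
    by_cases h : p x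
    · simp [h]
    · have h' : p x = false := by simpa using h
      cases hk : List.idxOf? true (xs.map p) with
      | none => rw [hk] at ih; simp only [hk] at *; simp [h', ← ih]
      | some s => rw [hk] at ih; simp only [hk] at *; simp [h', ih]

-- The first False of the mask marks where takeWhile (hit) stops.
theorem index_false_takeWhile (p : String → Bool) (ys : List String) :
    (match PySem.List.index? (ys.map p) false with
      | none => ys
      | some k => ys.take k) = ys.takeWhile p := by
  induction ys with
  | nil => rfl
  | cons y ys ih =>
    rw [PySem.List.index?_eq_idxOf?] at ih ⊢
    rw [List.map_cons, List.idxOf?_cons]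
    by_cases h : p y
    · cases hk : List.idxOf? false (ys.map p) with
      | none =>
        rw [hk] at ih
        have ih' : ys = List.takeWhile p ys := by simpa using ih
        simp [h, ← ih']
      | some k =>
        rw [hk] at ih
        have ih' : List.take k ys = List.takeWhile p ys := by simpa using ih
        simp [h, ← ih']
    · have h' : p y = false := by simpa using h
      simp [h']

-- ===== VERDICT (by name: the statement is the Claim_ definition above) =====
theorem prune_route_by_connectivity_py_spec : Claim_equal_prune_route_by_connectivity_py := by
  intro route ids _
  unfold Spec_prune_route_by_connectivity_py prune_route_by_connectivity_py
    prune_route_by_connectivity_py_alt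
  rw [pruneLoopA_false]
  have hdrop := index_true_dropWhile (fun r => ids.contains r) route
  cases hs : PySem.List.index? (route.map (fun r => ids.contains r)) true with
  | none =>
    rw [hs] at hdrop
    simp only [hs, ← hdrop, List.takeWhile_nil]
  | some start =>
    rw [hs] at hdrop
    simp only [hs]
    rw [← hdrop, ← List.map_drop]
    have htake := index_false_takeWhile (fun r => ids.contains r) (route.drop start)
    cases hk : PySem.List.index? ((route.drop start).map (fun r => ids.contains r)) false with
    | none =>
      rw [hk] at htake
      simp only [List.length_map]
      rw [← htake, PySem.List.slice_natCast]
      rw [List.take_of_length_le (by simp)]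
    | some k =>
      rw [hk] at htake
      rw [← htake,
        show ((start + k : Nat) : Int) = ((start : Int) + (k : Int)) by push_cast; ring,
        PySem.List.slice_natCast_add]
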